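-- pv_equiv track=rewrite | github.com/juancpuchFIUBA/TP1-Modelacion-Numerica | main.py | crear_vector_b
-- ===== SOURCE A (Python) =====
-- TEMPERATURA_ARRIBA = 63
--
-- TEMPERATURA_ABAJO = 44
--
-- TEMPERATURA_DERECHA = 72
--
-- def crear_vector_b (largo, ancho, temperatura_izquierda):
--     vector = []
--     for i in range(ancho):
--         for j in range(largo):
--             if (i == 0):
--                 if (j == 0 or j == largo - 1):
--                     vector.append(1)
--                 else:
--                     vector.append(TEMPERATURA_ARRIBA)
--             elif (i == (ancho - 1)):
--                 if (j == 0 or j == largo - 1):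
--                     vector.append(1)
--                 else:
--                     vector.append(TEMPERATURA_ABAJO)
--             elif (j == 0):
--                 vector.append(temperatura_izquierda)
--             elif (j == (largo - 1)):
--                 vector.append(TEMPERATURA_DERECHA)
--             else:
--                 vector.append(0)
--     return vector
-- ===== SOURCE B (Python) =====
-- TEMPERATURA_ARRIBA = 63
--
-- TEMPERATURA_ABAJO = 44
--
-- TEMPERATURA_DERECHA = 72
--
-- def crear_vector_b(largo, ancho, temperatura_izquierda):
--     if largo <= 0:
--         return []
--     def fila(i):
--         if i == 0:
--             return [1] if largo == 1 else [1] + [TEMPERATURA_ARRIBA] * (largo - 2) + [1]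
--         if i == ancho - 1:
--             return [1] if largo == 1 else [1] + [TEMPERATURA_ABAJO] * (largo - 2) + [1]
--         return [temperatura_izquierda] if largo == 1 else \
--             [temperatura_izquierda] + [0] * (largo - 2) + [TEMPERATURA_DERECHA]
--     vector = []
--     for i in range(ancho):
--         vector += fila(i)
--     return vector
-- ===== Notes on version B (the rewrite author's own statement) =====
-- stated objective: simpler
-- what changed: B loops only over rows and builds each whole row at once by list repetition/concatenation (corners + repeated middle), instead of A's nested per-cell loop with a five-way branch.
import Mathlib
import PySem

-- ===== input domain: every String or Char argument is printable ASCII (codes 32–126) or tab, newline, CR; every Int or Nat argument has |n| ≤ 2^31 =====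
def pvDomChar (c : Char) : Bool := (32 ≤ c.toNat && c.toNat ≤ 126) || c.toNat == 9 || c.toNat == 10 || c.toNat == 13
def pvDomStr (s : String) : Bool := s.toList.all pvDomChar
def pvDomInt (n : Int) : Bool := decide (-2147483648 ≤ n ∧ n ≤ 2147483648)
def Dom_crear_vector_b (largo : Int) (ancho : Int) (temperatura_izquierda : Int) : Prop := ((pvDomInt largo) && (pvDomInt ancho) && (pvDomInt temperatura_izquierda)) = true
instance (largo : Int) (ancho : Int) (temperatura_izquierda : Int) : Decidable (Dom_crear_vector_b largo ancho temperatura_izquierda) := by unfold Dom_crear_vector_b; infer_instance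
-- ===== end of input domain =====

-- B builds the vector row by row (corner + repeated middle + corner) instead of A's nested per-cell loop; objective: simpler.

-- ===== PORT A =====
-- literal transliteration: nested for-loops over range(ancho), range(largo), appending one cell at a time
def crear_vector_b (largo : Int) (ancho : Int) (temperatura_izquierda : Int) : List Int :=
  (PySem.List.pyRange 0 ancho 1).foldl (fun vector i =>
    (PySem.List.pyRange 0 largo 1).foldl (fun vector j =>
      vector ++ [if i = 0 then
                   (if j = 0 ∨ j = largo - 1 then 1 else 63)
                 else if i = ancho - 1 then
                   (if j = 0 ∨ j = largo - 1 then 1 else 44)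
                 else if j = 0 then temperatura_izquierda
                 else if j = largo - 1 then 72
                 else (0 : Int)]) vector) []

-- ===== PORT B =====
-- fila(i) from Source B: one whole row by repetition/concatenation
def pvFila (largo : Int) (ancho : Int) (temperatura_izquierda : Int) (i : Int) : List Int :=
  if i = 0 then
    (if largo = 1 then [1] else [1] ++ List.replicate (largo - 2).toNat 63 ++ [1])
  else if i = ancho - 1 then
    (if largo = 1 then [1] else [1] ++ List.replicate (largo - 2).toNat 44 ++ [1])
  else
    (if largo = 1 then [temperatura_izquierda]
     else [temperatura_izquierda] ++ List.replicate (largo - 2).toNat 0 ++ [72])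

def crear_vector_b_alt (largo : Int) (ancho : Int) (temperatura_izquierda : Int) : List Int :=
  if largo ≤ 0 then []
  else (PySem.List.pyRange 0 ancho 1).foldl
    (fun vector i => vector ++ pvFila largo ancho temperatura_izquierda i) []

-- ===== PRECONDITION & SPEC =====
def Spec_crear_vector_b (largo : Int) (ancho : Int) (temperatura_izquierda : Int) (out : List Int) : Prop := out = crear_vector_b_alt largo ancho temperatura_izquierda
instance (largo : Int) (ancho : Int) (temperatura_izquierda : Int) (out : List Int) : Decidable (Spec_crear_vector_b largo ancho temperatura_izquierda out) := by unfold Spec_crear_vector_b; infer_instance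

-- ===== CLAIM (what is proved, stated in full; the proofs are below) =====
def Claim_equal_crear_vector_b : Prop := ∀ (largo : Int) (ancho : Int) (temperatura_izquierda : Int), Dom_crear_vector_b largo ancho temperatura_izquierda → Spec_crear_vector_b largo ancho temperatura_izquierda (crear_vector_b largo ancho temperatura_izquierda)

-- ===== LEMMAS AND PROOFS =====

-- one row of A, as a map over the column range, equals corner + repeated middle + corner
lemma pv_map_row (x m y L : Int) (h : 1 ≤ L) :
    (PySem.List.pyRange 0 L 1).map (fun j => if j = 0 then x else if j = L - 1 then y else m)
    = (if L = 1 then [x] else [x] ++ List.replicate (L - 2).toNat m ++ [y]) := by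
  by_cases h1 : L = 1
  · subst h1
    rw [show PySem.List.pyRange 0 1 1 = [0] from PySem.List.pyRange_one_singleton 0]
    simp
  · rw [if_neg h1]
    apply List.ext_getElem
    · simp [PySem.List.length_pyRange_one]; omega
    · intro k hk hk'
      rw [List.getElem_map, PySem.List.getElem_pyRange_one]
      have hkL : k < L.toNat := by simpa [PySem.List.length_pyRange_one] using hk
      by_cases hk0 : k = 0
      · subst hk0; simp
      · obtain ⟨k', rfl⟩ : ∃ k', k = k' + 1 := ⟨k - 1, by omega⟩
        simp only [List.cons_append, List.nil_append, List.getElem_cons_succ]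
        rcases eq_or_lt_of_le (Nat.succ_le_of_lt hkL) with hlast | hmid
        · have hj : (0 : Int) + ((k' + 1 : Nat) : Int) = L - 1 := by omega
          rw [hj, if_neg (by omega : (L : Int) - 1 ≠ 0), if_pos rfl]
          rw [List.getElem_append_right (by simp; omega)]
          simp
        · have hj0 : (0 : Int) + ((k' + 1 : Nat) : Int) ≠ 0 := by omega
          have hjl : (0 : Int) + ((k' + 1 : Nat) : Int) ≠ L - 1 := by omega
          rw [if_neg hj0, if_neg hjl]
          rw [List.getElem_append_left (by simp; omega)]
          simp

lemma pv_inner (largo ancho t i : Int) (h : 1 ≤ largo) (v : List Int) :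
    (PySem.List.pyRange 0 largo 1).foldl (fun vector j =>
      vector ++ [if i = 0 then
                   (if j = 0 ∨ j = largo - 1 then 1 else 63)
                 else if i = ancho - 1 then
                   (if j = 0 ∨ j = largo - 1 then 1 else 44)
                 else if j = 0 then t
                 else if j = largo - 1 then 72
                 else (0 : Int)]) v
    = v ++ pvFila largo ancho t i := by
  rw [PySem.List.foldl_append_singleton_eq_map]
  congr 1
  unfold pvFila
  by_cases hi0 : i = 0
  · simp only [hi0, ite_true]
    rw [← pv_map_row 1 63 1 largo h]
    apply List.map_congr_left
    intro j _
    split_ifs with h1 h2 h3 <;> simp_all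
  · rw [if_neg hi0]
    by_cases hia : i = ancho - 1
    · simp only [hia, ite_true]
      rw [← pv_map_row 1 44 1 largo h]
      apply List.map_congr_left
      intro j _
      split_ifs with h1 h2 h3 <;> simp_all
    · simp only [hi0, hia, ite_false]
      rw [← pv_map_row t 0 72 largo h]

-- ===== VERDICT (by name: the statement is the Claim_ definition above) =====
theorem crear_vector_b_spec : Claim_equal_crear_vector_b := by
  intro L A t _
  unfold Spec_crear_vector_b crear_vector_b crear_vector_b_alt
  by_cases hL : L ≤ 0
  · rw [if_pos hL, PySem.List.pyRange_one_eq_nil (by omega)]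
    simp
  · rw [if_neg hL]
    have key : (fun (vector : List Int) (i : Int) =>
        (PySem.List.pyRange 0 L 1).foldl (fun vector j =>
          vector ++ [if i = 0 then
                       (if j = 0 ∨ j = L - 1 then 1 else 63)
                     else if i = A - 1 then
                       (if j = 0 ∨ j = L - 1 then 1 else 44)
                     else if j = 0 then t
                     else if j = L - 1 then 72
                     else (0 : Int)]) vector)
        = (fun vector i => vector ++ pvFila L A t i) := by
      funext v i
      exact pv_inner L A t i (by omega) v
    rw [key]
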